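-- pv_equiv track=rewrite | github.com/pypi-data/pypi-mirror-390 | packages/its-hub/its_hub-0.3.4.tar.gz/its_hub-0.3.4/its_hub/algorithms/bon.py | _dedupe_with_inverse
-- ===== SOURCE A (Python) =====
-- def _dedupe_with_inverse(seq: list[str]) -> tuple[list[str], list[int]]:
--     """
--     Deduplicate a sequence while preserving order and tracking original indices.
--
--     Returns (uniques, inverse_idx) where:
--     - uniques: list of unique items in order of first appearance
--     - inverse_idx: for each item in seq, its index in the uniques list
--
--     Example:
--         seq = ["a", "b", "a", "c", "b"]
--         returns (["a", "b", "c"], [0, 1, 0, 2, 1])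
--     """
--     uniques: list[str] = []
--     index_of: dict[str, int] = {}
--     inverse_idx: list[int] = []
--
--     for item in seq:
--         j = index_of.get(item)
--         if j is None:
--             j = len(uniques)
--             index_of[item] = j
--             uniques.append(item)
--         inverse_idx.append(j)
--
--     return uniques, inverse_idx
-- ===== SOURCE B (Python) =====
-- def _dedupe_with_inverse(seq: list[str]) -> tuple[list[str], list[int]]:
--     # Scan-based re-implementation: no dict at all.  An item is unique iff it
--     # does not occur in the prefix before it; its inverse index is its
--     # position in the uniques list, found by a list scan.
--     uniques = [x for i, x in enumerate(seq) if x not in seq[:i]]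
--     inverse_idx = [uniques.index(x) for x in seq]
--     return uniques, inverse_idx
-- ===== Notes on version B (the rewrite author's own statement) =====
-- stated objective: alternative
-- what changed: Drops the hash table entirely: B decides uniqueness by a membership scan of the prefix seq[:i] and computes each inverse index by list.index over the uniques list, instead of A's single interleaved loop maintaining a value-to-index dict.
import Mathlib
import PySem

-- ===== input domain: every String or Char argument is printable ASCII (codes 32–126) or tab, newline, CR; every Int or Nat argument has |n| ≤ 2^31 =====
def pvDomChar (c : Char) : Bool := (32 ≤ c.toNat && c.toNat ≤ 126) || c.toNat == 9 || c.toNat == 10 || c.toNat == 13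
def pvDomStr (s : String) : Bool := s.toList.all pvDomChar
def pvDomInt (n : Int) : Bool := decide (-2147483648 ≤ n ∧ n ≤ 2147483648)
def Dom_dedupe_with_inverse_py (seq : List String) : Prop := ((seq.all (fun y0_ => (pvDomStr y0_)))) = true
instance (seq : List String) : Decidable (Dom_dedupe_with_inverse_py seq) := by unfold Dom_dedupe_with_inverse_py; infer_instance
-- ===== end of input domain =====

-- B drops A's dict entirely: uniqueness by prefix-membership scan, inverse index by list scan (alternative algorithm, same results).

-- ===== PORT A =====
-- the for-loop of A: state (uniques, index_of, inverse_idx), one step per item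
def pvGoA : List String → List String → PySem.Dict String Int → List Int → List String × List Int
  | [], uniques, _, inverse_idx => (uniques, inverse_idx)
  | item :: rest, uniques, index_of, inverse_idx =>
    match index_of.get? item with
    | some j => pvGoA rest uniques index_of (inverse_idx ++ [j])
    | none =>
      let j : Int := uniques.length
      pvGoA rest (uniques ++ [item]) (index_of.insert item j) (inverse_idx ++ [j])

def dedupe_with_inverse_py (seq : List String) : List String × List Int :=
  pvGoA seq [] PySem.Dict.empty []

-- ===== PORT B =====
def dedupe_with_inverse_py_alt (seq : List String) : List String × List Int :=
  -- [x for i, x in enumerate(seq) if x not in seq[:i]]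
  let uniques := ((PySem.List.enumerate seq).filter
      (fun p => decide (p.2 ∉ PySem.List.slice seq none (some p.1)))).map (·.2)
  -- uniques.index(x): x always occurs in uniques, so Python's .index never raises; ported as index? with unreachable default 0
  let inverse_idx := seq.map (fun x => (((PySem.List.index? uniques x).getD 0 : Nat) : Int))
  (uniques, inverse_idx)

-- ===== PRECONDITION & SPEC =====
def Spec_dedupe_with_inverse_py (seq : List String) (out : List String × List Int) : Prop := out = dedupe_with_inverse_py_alt seq
instance (seq : List String) (out : List String × List Int) : Decidable (Spec_dedupe_with_inverse_py seq out) := by unfold Spec_dedupe_with_inverse_py; infer_instance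

-- ===== CLAIM (what is proved, stated in full; the proofs are below) =====
def Claim_equal_dedupe_with_inverse_py : Prop := ∀ (seq : List String), Dom_dedupe_with_inverse_py seq → Spec_dedupe_with_inverse_py seq (dedupe_with_inverse_py seq)

-- ===== LEMMAS AND PROOFS =====

-- both programs compute (dedup seq, seq.map (fun x => idxOf x in dedup seq)); we prove each side equal to that canonical form

lemma pv_dedup_eq_foldl (seq : List String) :
    PySem.List.dedup seq = seq.foldl PySem.Set.add [] := by
  simp [PySem.List.dedup, PySem.Set.ofList]

lemma pv_add_of_mem {s : List String} {x : String} (h : x ∈ s) : PySem.Set.add s x = s := by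
  simp [PySem.Set.add, h]

lemma pv_add_of_not_mem {s : List String} {x : String} (h : x ∉ s) :
    PySem.Set.add s x = s ++ [x] := by
  simp [PySem.Set.add, h]

lemma pv_idxOf?_of_mem {D : List String} {x : String} (h : x ∈ D) :
    D.idxOf? x = some (D.idxOf x) := by
  have hs := List.isSome_idxOf?.mpr h
  cases heq : D.idxOf? x with
  | none => simp [heq] at hs
  | some k => rw [List.idxOf_eq_getD_idxOf?, heq]; rfl

lemma pv_idxOf?_append_singleton_self {u : List String} {x : String} (h : x ∉ u) :
    (u ++ [x]).idxOf? x = some u.length := by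
  rw [← PySem.List.index?_eq_idxOf?]
  exact PySem.List.index?_append_singleton_self u x h

lemma pv_idxOf?_append_singleton {u : List String} {x y : String} (h : y ≠ x) :
    (u ++ [x]).idxOf? y = u.idxOf? y := by
  by_cases hm : y ∈ u
  · rw [← PySem.List.index?_eq_idxOf?, ← PySem.List.index?_eq_idxOf?]
    exact PySem.List.index?_append_of_mem _ hm
  · rw [List.idxOf?_eq_none_iff.mpr hm, List.idxOf?_eq_none_iff.mpr (by
      intro hc
      rcases List.mem_append.mp hc with h1 | h2
      · exact hm h1
      · exact h (List.mem_singleton.mp h2))]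

-- the dedup fold only appends to its accumulator
lemma pv_foldl_add_prefix (l : List String) : ∀ (u : List String), ∃ t, l.foldl PySem.Set.add u = u ++ t := by
  induction l with
  | nil => intro u; exact ⟨[], by simp⟩
  | cons x rest ih =>
    intro u
    by_cases hm : x ∈ u
    · simpa [pv_add_of_mem hm] using ih u
    · rcases ih (u ++ [x]) with ⟨t, ht⟩
      exact ⟨[x] ++ t, by simp [pv_add_of_not_mem hm, ht]⟩

-- the loop invariant of A: index_of maps each unique to its index in uniques
lemma pvGoA_eq (l : List String) : ∀ (u : List String) (d : PySem.Dict String Int) (inv : List Int),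
    (∀ y, d.get? y = (u.idxOf? y).map (fun n => (n : Int))) →
    pvGoA l u d inv =
      (l.foldl PySem.Set.add u,
       inv ++ l.map (fun x => (((l.foldl PySem.Set.add u).idxOf x : Nat) : Int))) := by
  induction l with
  | nil => intro u d inv _; simp [pvGoA]
  | cons x rest ih =>
    intro u d inv hinv
    by_cases hm : x ∈ u
    · have hget : d.get? x = some ((u.idxOf x : Nat) : Int) := by
        rw [hinv x, pv_idxOf?_of_mem hm]; rfl
      rcases pv_foldl_add_prefix rest u with ⟨t, ht⟩
      have hidx : (rest.foldl PySem.Set.add u).idxOf x = u.idxOf x := by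
        rw [ht]; exact List.idxOf_append_of_mem hm
      simp only [pvGoA, hget]
      rw [ih u d (inv ++ [((u.idxOf x : Nat) : Int)]) hinv]
      simp [List.foldl_cons, pv_add_of_mem hm, hidx]
    · have hget : d.get? x = none := by
        rw [hinv x, List.idxOf?_eq_none_iff.mpr hm]; rfl
      have hinv' : ∀ y, (d.insert x ((u.length : Nat) : Int)).get? y
          = ((u ++ [x]).idxOf? y).map (fun n => (n : Int)) := by
        intro y
        by_cases hy : y = x
        · subst hy
          rw [PySem.Dict.get?_insert_self, pv_idxOf?_append_singleton_self hm]
          rfl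
        · rw [PySem.Dict.get?_insert_of_ne _ _ hy, hinv y, pv_idxOf?_append_singleton hy]
      rcases pv_foldl_add_prefix rest (u ++ [x]) with ⟨t, ht⟩
      have hidx : (rest.foldl PySem.Set.add (u ++ [x])).idxOf x = u.length := by
        rw [ht, List.idxOf_append_of_mem (by simp)]
        have := pv_idxOf?_append_singleton_self hm
        rw [List.idxOf_eq_getD_idxOf?, this]
        rfl
      simp only [pvGoA, hget]
      rw [ih (u ++ [x]) _ (inv ++ [((u.length : Nat) : Int)]) hinv']
      simp [List.foldl_cons, pv_add_of_not_mem hm, hidx]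

lemma pvA_canonical (seq : List String) :
    dedupe_with_inverse_py seq =
      (PySem.List.dedup seq,
       seq.map (fun x => (((PySem.List.dedup seq).idxOf x : Nat) : Int))) := by
  rw [dedupe_with_inverse_py, pvGoA_eq seq [] PySem.Dict.empty [] (by simp)]
  rw [pv_dedup_eq_foldl]
  simp

-- B's prefix-scan comprehension builds exactly the ordered dedup of seq
lemma pvB_uniques (seq : List String) :
    ((PySem.List.enumerate seq).filter
        (fun p => decide (p.2 ∉ PySem.List.slice seq none (some p.1)))).map (·.2)
      = PySem.List.dedup seq := by
  induction seq using List.reverseRecOn with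
  | nil => simp [PySem.List.enumerate]
  | append_singleton l a ih =>
    rw [PySem.List.enumerate_append, List.filter_append, List.map_append]
    have hcong : (PySem.List.enumerate l 0).filter
        (fun p => decide (p.2 ∉ PySem.List.slice (l ++ [a]) none (some p.1)))
        = (PySem.List.enumerate l 0).filter
        (fun p => decide (p.2 ∉ PySem.List.slice l none (some p.1))) := by
      apply List.filter_congr
      intro p hp
      rcases (PySem.List.mem_enumerate_iff _ _ _).mp hp with ⟨k, hk, hpk⟩
      subst hpk
      simp only [zero_add, PySem.List.slice_to_natCast]
      rw [List.take_append_of_le_length (le_of_lt hk)]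
    rw [hcong, ih]
    have hlast : (PySem.List.enumerate [a] (0 + l.length)).filter
        (fun p => decide (p.2 ∉ PySem.List.slice (l ++ [a]) none (some p.1)))
        = if a ∈ l then [] else [((l.length : Int), a)] := by
      simp only [PySem.List.enumerate, zero_add]
      have htake : PySem.List.slice (l ++ [a]) none (some ((l.length : Nat) : Int)) = l := by
        rw [PySem.List.slice_to_natCast]
        simp
      by_cases hm : a ∈ l
      · simp [htake, hm]
      · simp [htake, hm]
    rw [hlast, pv_dedup_eq_foldl, pv_dedup_eq_foldl, List.foldl_append]
    by_cases hm : a ∈ l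
    · have : a ∈ l.foldl PySem.Set.add [] := by
        rw [← pv_dedup_eq_foldl]
        exact (PySem.List.mem_dedup l a).mpr hm
      simp [hm, pv_add_of_mem this]
    · have : a ∉ l.foldl PySem.Set.add [] := by
        rw [← pv_dedup_eq_foldl]
        intro hc
        exact hm ((PySem.List.mem_dedup l a).mp hc)
      simp [hm, pv_add_of_not_mem this]

lemma pvB_canonical (seq : List String) :
    dedupe_with_inverse_py_alt seq =
      (PySem.List.dedup seq,
       seq.map (fun x => (((PySem.List.dedup seq).idxOf x : Nat) : Int))) := by
  unfold dedupe_with_inverse_py_alt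
  rw [pvB_uniques]
  refine Prod.ext rfl ?_
  refine List.map_congr_left ?_
  intro x hx
  have hmem : x ∈ PySem.List.dedup seq := (PySem.List.mem_dedup seq x).mpr hx
  rw [PySem.List.index?_eq_idxOf?, pv_idxOf?_of_mem hmem]
  rfl

-- ===== VERDICT (by name: the statement is the Claim_ definition above) =====
theorem dedupe_with_inverse_py_spec : Claim_equal_dedupe_with_inverse_py := by
  intro seq _
  unfold Spec_dedupe_with_inverse_py
  rw [pvA_canonical, pvB_canonical]
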